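-- pv_equiv track=rewrite | github.com/infoclusiv/clusiv-auto | config.py | normalizar_ejecutar_hasta_prompt
-- ===== SOURCE A (Python) =====
-- def obtener_cortes_validos_prueba(prompts):
--     cortes = []
--     for idx, prompt in enumerate(prompts, start=1):
--         nombre = str(prompt.get("nombre", "")).strip().lower()
--         if "teleprompter" in nombre:
--             cortes.append(idx)
--
--     total = len(prompts)
--     if total and total not in cortes:
--         cortes.append(total)
--
--     return cortes
--
-- def normalizar_ejecutar_hasta_prompt(valor, prompts):
--     total = len(prompts)
--     if total <= 0:
--         return 0
--
--     try:
--         valor_normalizado = int(valor or 0)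
--     except (TypeError, ValueError):
--         valor_normalizado = 0
--
--     if valor_normalizado <= 0 or valor_normalizado >= total:
--         return 0
--
--     cortes_validos = obtener_cortes_validos_prueba(prompts)
--     if valor_normalizado in cortes_validos:
--         return valor_normalizado
--
--     cortes_menores = [corte for corte in cortes_validos if corte <= valor_normalizado]
--     if cortes_menores:
--         return max(cortes_menores)
--
--     return cortes_validos[0] if cortes_validos else 0
-- ===== SOURCE B (Python) =====
-- def normalizar_ejecutar_hasta_prompt(valor, prompts):
--     total = len(prompts)
--     if total <= 0:
--         return 0
--
--     try:
--         valor_normalizado = int(valor or 0)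
--     except (TypeError, ValueError):
--         valor_normalizado = 0
--
--     if valor_normalizado <= 0 or valor_normalizado >= total:
--         return 0
--
--     # One pass over the prompts: track the largest teleprompter cut <= valor
--     # and the first teleprompter cut, instead of building the cut list and
--     # re-scanning it with membership / filter / max.
--     mejor_le = None
--     primero = None
--     for idx, prompt in enumerate(prompts, start=1):
--         nombre = str(prompt.get("nombre", "")).strip().lower()
--         if "teleprompter" in nombre:
--             if idx <= valor_normalizado:
--                 mejor_le = idx
--             if primero is None:
--                 primero = idx
--
--     if mejor_le is not None:
--         return mejor_le
--     if primero is not None: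
--         return primero
--     # no teleprompter prompts: the only valid cut is the synthetic one at total
--     return total
-- ===== Notes on version B (the rewrite author's own statement) =====
-- stated objective: alternative
-- what changed: B replaces A's build-the-cut-list-then-rescan cascade (membership test, filter, max, head) by a single pass over the prompts that maintains the largest teleprompter cut <= valor and the first teleprompter cut, falling back to the synthetic cut at total.
import Mathlib
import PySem

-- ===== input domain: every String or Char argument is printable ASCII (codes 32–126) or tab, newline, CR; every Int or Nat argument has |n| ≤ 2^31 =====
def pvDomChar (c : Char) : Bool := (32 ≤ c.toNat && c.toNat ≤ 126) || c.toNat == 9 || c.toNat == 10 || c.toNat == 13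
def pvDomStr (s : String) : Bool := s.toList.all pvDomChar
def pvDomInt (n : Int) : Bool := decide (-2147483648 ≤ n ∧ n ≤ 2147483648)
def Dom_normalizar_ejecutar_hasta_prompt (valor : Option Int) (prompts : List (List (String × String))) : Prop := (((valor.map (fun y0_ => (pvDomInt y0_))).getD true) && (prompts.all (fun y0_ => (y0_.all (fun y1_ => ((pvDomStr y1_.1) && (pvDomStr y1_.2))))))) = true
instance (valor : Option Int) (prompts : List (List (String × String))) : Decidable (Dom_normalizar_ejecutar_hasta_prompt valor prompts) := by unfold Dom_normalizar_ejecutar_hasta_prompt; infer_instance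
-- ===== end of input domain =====

-- B replaces A's build-cut-list-then-rescan cascade by a single pass keeping the
-- best cut <= valor and the first cut (alternative decomposition, same cost).


-- shared helper: nombre = str(prompt.get("nombre","")).strip().lower(); "teleprompter" in nombre
def pvTele (prompt : List (String × String)) : Bool :=
  PySem.Str.isIn "teleprompter" (PySem.Str.lower (PySem.Str.strip (PySem.Dict.getD (PySem.Dict.mk prompt) "nombre" "")))

-- ===== PORT A =====
def obtener_cortes_validos_prueba (prompts : List (List (String × String))) : List Int :=
  let r := prompts.foldl
    (fun (st : List Int × Int) prompt =>
      (if pvTele prompt then st.1 ++ [st.2] else st.1, st.2 + 1)) ([], 1)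
  let cortes := r.1
  let total : Int := prompts.length
  if total ≠ 0 ∧ total ∉ cortes then cortes ++ [total] else cortes

def normalizar_ejecutar_hasta_prompt (valor : Option Int) (prompts : List (List (String × String))) : Int :=
  let total : Int := prompts.length
  if total ≤ 0 then 0
  else
    -- int(valor or 0): None and 0 both give 0; an Int is its own int()
    let valor_normalizado : Int := valor.getD 0
    if valor_normalizado ≤ 0 ∨ valor_normalizado ≥ total then 0
    else
      let cortes_validos := obtener_cortes_validos_prueba prompts
      if valor_normalizado ∈ cortes_validos then valor_normalizado
      else
        let cortes_menores := cortes_validos.filter (fun c => c ≤ valor_normalizado)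
        if cortes_menores ≠ [] then
          match PySem.List.max? cortes_menores (fun x => x) with
          | some m => m
          | none => 0   -- unreachable under the nonempty guard (Python max would raise)
        else
          match cortes_validos with
          | c :: _ => c
          | [] => 0

-- ===== PORT B =====
def normalizar_ejecutar_hasta_prompt_alt (valor : Option Int) (prompts : List (List (String × String))) : Int :=
  let total : Int := prompts.length
  if total ≤ 0 then 0
  else
    let v : Int := valor.getD 0
    if v ≤ 0 ∨ v ≥ total then 0
    else
      let st := prompts.foldl
        (fun (st : Option Int × Option Int × Int) prompt =>
          let idx := st.2.2 + 1
          if pvTele prompt then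
            ((if idx ≤ v then some idx else st.1),
             (if st.2.1.isNone then some idx else st.2.1), idx)
          else (st.1, st.2.1, idx)) (none, none, 0)
      match st.1 with
      | some m => m
      | none =>
        match st.2.1 with
        | some p => p
        | none => total

-- ===== PRECONDITION & SPEC =====
def Spec_normalizar_ejecutar_hasta_prompt (valor : Option Int) (prompts : List (List (String × String))) (out : Int) : Prop := out = normalizar_ejecutar_hasta_prompt_alt valor prompts
instance (valor : Option Int) (prompts : List (List (String × String))) (out : Int) : Decidable (Spec_normalizar_ejecutar_hasta_prompt valor prompts out) := by unfold Spec_normalizar_ejecutar_hasta_prompt; infer_instance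

-- ===== CLAIM (what is proved, stated in full; the proofs are below) =====
def Claim_equal_normalizar_ejecutar_hasta_prompt : Prop := ∀ (valor : Option Int) (prompts : List (List (String × String))), Dom_normalizar_ejecutar_hasta_prompt valor prompts → Spec_normalizar_ejecutar_hasta_prompt valor prompts (normalizar_ejecutar_hasta_prompt valor prompts)

-- ===== LEMMAS AND PROOFS =====

-- reference list of teleprompter cut indices, numbered from i
def pvCuts (prompts : List (List (String × String))) (i : Int) : List Int :=
  match prompts with
  | [] => []
  | p :: ps => if pvTele p then i :: pvCuts ps (i + 1) else pvCuts ps (i + 1)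

def pvFoldM (v : Int) (m : Option Int) (l : List Int) : Option Int :=
  l.foldl (fun m c => if c ≤ v then some c else m) m

def pvFoldP (p : Option Int) (l : List Int) : Option Int :=
  l.foldl (fun p c => if p.isNone then some c else p) p

lemma pvFoldA (prompts : List (List (String × String))) : ∀ (acc : List Int) (i : Int),
    prompts.foldl
      (fun (st : List Int × Int) prompt =>
        (if pvTele prompt then st.1 ++ [st.2] else st.1, st.2 + 1)) (acc, i)
    = (acc ++ pvCuts prompts i, i + prompts.length) := by
  induction prompts with
  | nil => intro acc i; simp [pvCuts]
  | cons p ps ih =>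
    intro acc i
    simp only [List.foldl_cons]
    by_cases h : pvTele p
    · simp only [h, if_true]
      rw [ih]
      simp [pvCuts, h]
      push_cast; ring
    · simp only [h, if_false]
      rw [ih]
      simp [pvCuts, h]
      push_cast; ring

set_option maxHeartbeats 1000000 in
lemma pvFoldB (v : Int) (prompts : List (List (String × String))) :
    ∀ (m p : Option Int) (i : Int),
    prompts.foldl
      (fun (st : Option Int × Option Int × Int) prompt =>
        let idx := st.2.2 + 1
        if pvTele prompt then
          ((if idx ≤ v then some idx else st.1),
           (if st.2.1.isNone then some idx else st.2.1), idx)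
        else (st.1, st.2.1, idx)) (m, p, i)
    = (pvFoldM v m (pvCuts prompts (i + 1)), pvFoldP p (pvCuts prompts (i + 1)),
       i + prompts.length) := by
  induction prompts with
  | nil => intro m p i; simp [pvCuts, pvFoldM, pvFoldP]
  | cons q ps ih =>
    intro m p i
    simp only [List.foldl_cons]
    by_cases h : pvTele q
    · simp only [h, if_true]
      rw [ih]
      simp [pvCuts, h, pvFoldM, pvFoldP]
      push_cast; ring
    · simp only [h, if_false]
      rw [ih]
      simp [pvCuts, h]
      push_cast; ring

lemma pvCuts_bounds (prompts : List (List (String × String))) :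
    ∀ (i : Int) (c : Int), c ∈ pvCuts prompts i → i ≤ c ∧ c < i + prompts.length := by
  induction prompts with
  | nil => intro i c hc; simp [pvCuts] at hc
  | cons p ps ih =>
    intro i c hc
    have hlen : ((p :: ps).length : Int) = (ps.length : Int) + 1 := by simp
    by_cases h : pvTele p <;>
      simp only [pvCuts, h, if_true, if_false, List.mem_cons] at hc
    · rcases hc with rfl | hc
      · omega
      · have := ih (i + 1) c hc; omega
    · have := ih (i + 1) c hc; omega

lemma pvCuts_pairwise (prompts : List (List (String × String))) :
    ∀ (i : Int), (pvCuts prompts i).Pairwise (· < ·) := by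
  induction prompts with
  | nil => intro i; simp [pvCuts]
  | cons p ps ih =>
    intro i
    by_cases h : pvTele p <;> simp [pvCuts, h]
    · exact ⟨fun c hc => by have := pvCuts_bounds ps (i + 1) c hc; omega, ih (i + 1)⟩
    · exact ih (i + 1)

lemma pvFoldM_id (v : Int) (l : List Int) (h : ∀ c ∈ l, ¬ c ≤ v) :
    ∀ m, pvFoldM v m l = m := by
  induction l with
  | nil => intro m; simp [pvFoldM]
  | cons c t ih =>
    intro m
    have hc := h c (by simp)
    simp only [pvFoldM, List.foldl_cons, if_neg hc]
    exact ih (fun x hx => h x (by simp [hx])) m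

lemma pvFoldM_last (v : Int) (l : List Int) (hp : l.Pairwise (· < ·)) (m : Int)
    (hm : m ∈ l) (hmv : m ≤ v) (hmax : ∀ y ∈ l, y ≤ v → y ≤ m) :
    ∀ m0, pvFoldM v m0 l = some m := by
  induction l with
  | nil => simp at hm
  | cons c t ih =>
    intro m0
    rcases List.pairwise_cons.mp hp with ⟨hct, ht⟩
    rcases List.mem_cons.mp hm with rfl | hmt
    · -- m = c; every later element exceeds v
      have hgt : ∀ x ∈ t, ¬ x ≤ v := fun x hx hxv =>
        absurd (hmax x (by simp [hx]) hxv) (not_le.mpr (hct x hx))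
      simp only [pvFoldM, List.foldl_cons, if_pos hmv]
      exact pvFoldM_id v t hgt (some m)
    · have hc : c ≤ m := le_of_lt (hct m hmt)
      have := ih ht hmt (fun y hy => hmax y (by simp [hy]))
      by_cases hcv : c ≤ v <;>
        simp only [pvFoldM, List.foldl_cons, if_pos, if_neg, hcv, if_true, if_false] <;>
        exact this _

lemma pvFoldP_some (a : Int) (l : List Int) : pvFoldP (some a) l = some a := by
  induction l with
  | nil => rfl
  | cons c t ih => simpa [pvFoldP] using ih

lemma pvFoldP_head (l : List Int) : pvFoldP none l = l.head? := by
  cases l with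
  | nil => rfl
  | cons c t =>
    have h := pvFoldP_some c t
    simp only [pvFoldP, List.foldl_cons] at h ⊢
    simpa using h

-- ===== VERDICT (by name: the statement is the Claim_ definition above) =====
theorem normalizar_ejecutar_hasta_prompt_spec : Claim_equal_normalizar_ejecutar_hasta_prompt := by
  intro valor prompts _
  unfold Spec_normalizar_ejecutar_hasta_prompt
  have hOC : obtener_cortes_validos_prueba prompts =
      (if (prompts.length : Int) ≠ 0 ∧ (prompts.length : Int) ∉ pvCuts prompts 1
       then pvCuts prompts 1 ++ [(prompts.length : Int)] else pvCuts prompts 1) := by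
    simp only [obtener_cortes_validos_prueba]
    rw [pvFoldA prompts [] 1]
    simp
  simp only [normalizar_ejecutar_hasta_prompt, normalizar_ejecutar_hasta_prompt_alt]
  by_cases h0 : (prompts.length : Int) ≤ 0
  · have hnil : prompts = [] := by
      cases prompts with
      | nil => rfl
      | cons a l => simp at h0; omega
    subst hnil
    simp
  · simp only [if_neg h0]
    by_cases h1 : valor.getD 0 ≤ 0 ∨ valor.getD 0 ≥ (prompts.length : Int)
    · simp only [if_pos h1]
    · simp only [if_neg h1]
      obtain ⟨hv0', hvT'⟩ := not_or.mp h1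
      have hv0 : 0 < valor.getD 0 := not_le.mp hv0'
      have hvT : valor.getD 0 < (prompts.length : Int) := not_le.mp hvT' 
      rw [hOC, pvFoldB (valor.getD 0) prompts none none 0]
      have h01 : (0 : Int) + 1 = 1 := by norm_num
      rw [h01]
      set v : Int := valor.getD 0 with hvdef
      set T : Int := (prompts.length : Int) with hTdef
      set L : List Int := pvCuts prompts 1 with hLdef
      set C : List Int := (if T ≠ 0 ∧ T ∉ L then L ++ [T] else L) with hCdef
      have hb : ∀ c ∈ L, 1 ≤ c ∧ c < 1 + T := by
        intro c hc; exact pvCuts_bounds prompts 1 c hc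
      have hpw : L.Pairwise (· < ·) := pvCuts_pairwise prompts 1
      have hCfil : C.filter (fun c => decide (c ≤ v)) = L.filter (fun c => decide (c ≤ v)) := by
        rw [hCdef]; split_ifs with hTc
        · rw [List.filter_append]
          have : ¬ (T ≤ v) := by omega
          simp [this]
        · rfl
      by_cases hvL : v ∈ L
      · -- valor is itself a teleprompter cut
        have hvC : v ∈ C := by
          rw [hCdef]; split_ifs <;> simp [hvL]
        rw [if_pos hvC]
        have hM : pvFoldM v none L = some v :=
          pvFoldM_last v L hpw v hvL le_rfl (fun y _ hy => hy) none
        rw [hM]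
      · have hvC : v ∉ C := by
          rw [hCdef]; split_ifs with hTc
          · simp only [List.mem_append, List.mem_singleton]
            rintro (h | h)
            · exact hvL h
            · omega
          · exact hvL
        rw [if_neg hvC, hCfil]
        by_cases hfil : L.filter (fun c => decide (c ≤ v)) = []
        · -- no cut at or below valor: fall back to the first valid cut
          have hM : pvFoldM v none L = none := by
            refine pvFoldM_id v L ?_ none
            intro c hc hcv
            have : c ∈ L.filter (fun c => decide (c ≤ v)) := by
              simp [List.mem_filter, hc, hcv]
            rw [hfil] at this; simp at this
          rw [if_neg (by simp [hfil]), hM, pvFoldP_head]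
          cases hLc : L with
          | nil =>
            have hTC : T ≠ 0 ∧ T ∉ L := ⟨by omega, by simp [hLc]⟩
            rw [hCdef, if_pos hTC, hLc]
            simp
          | cons c t =>
            rw [hCdef]
            split_ifs with hTc <;> rw [hLc] <;> simp
        · -- return the largest valid cut below valor
          rw [if_pos hfil]
          cases hmx : PySem.List.max? (L.filter (fun c => decide (c ≤ v))) (fun x => x) with
          | none => exact absurd ((PySem.List.max?_eq_none_iff _ _).mp hmx) hfil
          | some m =>
            have hmem := PySem.List.max?_mem hmx
            have hmax := PySem.List.max?_isMax hmx
            simp only [List.mem_filter, decide_eq_true_eq] at hmem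
            have hM : pvFoldM v none L = some m := by
              refine pvFoldM_last v L hpw m hmem.1 hmem.2 ?_ none
              intro y hy hyv
              have : y ∈ L.filter (fun c => decide (c ≤ v)) := by
                simp [List.mem_filter, hy, hyv]
              simpa using hmax y this
            rw [hM]
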